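-- pv_equiv track=rewrite | github.com/splendor-dev/splendor | src/splendor/commands/ingest.py | _build_extract
-- ===== SOURCE A (Python) =====
-- def _build_extract(text: str) -> str:
--     lines = text.splitlines()
--     start_index = 0
--     for index, line in enumerate(lines):
--         if line.strip():
--             start_index = index
--             break
--
--     extract_lines: list[str] = []
--     char_count = 0
--     for line in lines[start_index : start_index + 80]:
--         projected_count = char_count + len(line) + 1
--         if projected_count > 4000 and extract_lines:
--             break
--         extract_lines.append(line)
--         char_count = projected_count
--
--     return "\n".join(extract_lines).rstrip()
-- ===== SOURCE B (Python) =====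
-- def _build_extract(text: str) -> str:
--     extract_lines: list[str] = []
--     char_count = 0
--     started = False
--     for line in text.splitlines():
--         if not started:
--             if not line.strip():
--                 continue
--             started = True
--         projected = char_count + len(line) + 1
--         if projected > 4000 and extract_lines:
--             break
--         extract_lines.append(line)
--         char_count = projected
--         if len(extract_lines) == 80:
--             break
--     return "\n".join(extract_lines).rstrip()
-- ===== Notes on version B (the rewrite author's own statement) =====
-- stated objective: alternative
-- what changed: A's two sequential loops (find the index of the first non-blank line, then accumulate over an 80-line slice from that index) are fused into a single pass over splitlines() with a `started` flag, an appended-line cap and a running char count.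
import Mathlib
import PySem

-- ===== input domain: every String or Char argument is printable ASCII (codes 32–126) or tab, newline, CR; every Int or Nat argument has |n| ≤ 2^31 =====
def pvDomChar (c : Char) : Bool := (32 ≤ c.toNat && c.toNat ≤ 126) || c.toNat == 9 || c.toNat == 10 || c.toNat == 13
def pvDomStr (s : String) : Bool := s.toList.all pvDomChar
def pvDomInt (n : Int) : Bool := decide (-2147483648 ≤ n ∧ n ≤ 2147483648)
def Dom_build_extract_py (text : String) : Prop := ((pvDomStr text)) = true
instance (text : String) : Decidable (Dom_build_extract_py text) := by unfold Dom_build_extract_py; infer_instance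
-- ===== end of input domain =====

-- B replaces A's two loops (find the first non-blank line, then accumulate a slice)
-- by a single pass with a `started` flag; same cost, different decomposition (objective: alternative).

-- ===== PORT A =====
-- for index, line in enumerate(lines): if line.strip(): start_index = index; break
def pvAFind : Nat → List String → Nat
  | _, [] => 0
  | i, l :: ls => if PySem.Str.strip l ≠ "" then i else pvAFind (i+1) ls

-- for line in lines[start_index : start_index + 80]: … with the projected-count break
def pvAAcc : List String → List String → Int → List String
  | [], acc, _ => acc
  | l :: ls, acc, cc =>
    let p := cc + PySem.Str.len l + 1
    if p > 4000 ∧ acc ≠ [] then acc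
    else pvAAcc ls (acc ++ [l]) p

def build_extract_py (text : String) : String :=
  PySem.Str.rstrip (PySem.Str.join "\n"
    (pvAAcc (PySem.List.slice (PySem.Str.splitlines text)
        (some ((pvAFind 0 (PySem.Str.splitlines text) : Int)))
        (some ((pvAFind 0 (PySem.Str.splitlines text) : Int) + 80))) [] 0))

-- ===== PORT B =====
-- single pass: skip blank lines while not started, then accumulate with both breaks
def pvBLoop : List String → Bool → List String → Int → List String
  | [], _, acc, _ => acc
  | l :: ls, started, acc, cc =>
    if started = false ∧ PySem.Str.strip l = "" then pvBLoop ls started acc cc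
    else
      let p := cc + PySem.Str.len l + 1
      if p > 4000 ∧ acc ≠ [] then acc
      else
        let acc' := acc ++ [l]
        if acc'.length = 80 then acc'
        else pvBLoop ls true acc' p

def build_extract_py_alt (text : String) : String :=
  PySem.Str.rstrip (PySem.Str.join "\n" (pvBLoop (PySem.Str.splitlines text) false [] 0))

-- ===== PRECONDITION & SPEC =====
def Spec_build_extract_py (text : String) (out : String) : Prop := out = build_extract_py_alt text
instance (text : String) (out : String) : Decidable (Spec_build_extract_py text out) := by unfold Spec_build_extract_py; infer_instance

-- ===== CLAIM (what is proved, stated in full; the proofs are below) =====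
def Claim_equal_build_extract_py : Prop := ∀ (text : String), Dom_build_extract_py text → Spec_build_extract_py text (build_extract_py text)

-- ===== LEMMAS AND PROOFS =====

-- A's accumulate loop over the next (80 - acc.length) lines is B's started-phase loop.
theorem pv_acc_eq (ls : List String) : ∀ (acc : List String) (cc : Int), acc.length < 80 →
    pvAAcc (ls.take (80 - acc.length)) acc cc = pvBLoop ls true acc cc := by
  induction ls with
  | nil => intro acc cc _; simp [pvAAcc, pvBLoop]
  | cons l ls ih =>
    intro acc cc h
    have htake : (80 - acc.length) = (79 - acc.length) + 1 := by omega
    rw [htake]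
    simp only [List.take_succ_cons, pvAAcc, pvBLoop]
    rw [if_neg (show ¬(true = false ∧ PySem.Str.strip l = "") by simp)]
    by_cases hbr : cc + PySem.Str.len l + 1 > 4000 ∧ acc ≠ []
    · rw [if_pos hbr, if_pos hbr]
    · rw [if_neg hbr, if_neg hbr]
      by_cases h80 : (acc ++ [l]).length = 80
      · have h0 : 79 - acc.length = 0 := by simp only [List.length_append, List.length_cons, List.length_nil] at h80; omega
        rw [if_pos h80, h0]
        simp [pvAAcc]
      · have hlt : (acc ++ [l]).length < 80 := by simp only [List.length_append, List.length_cons, List.length_nil] at h80 ⊢; omega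
        rw [if_neg h80]
        have hrec := ih (acc ++ [l]) (cc + PySem.Str.len l + 1) hlt
        have harith : 80 - (acc ++ [l]).length = 79 - acc.length := by simp only [List.length_append, List.length_cons, List.length_nil]; omega
        rw [harith] at hrec
        exact hrec

theorem pv_bloop_skip (l : String) (ls acc : List String) (cc : Int)
    (h : PySem.Str.strip l = "") : pvBLoop (l :: ls) false acc cc = pvBLoop ls false acc cc := by
  simp [pvBLoop, h]

theorem pv_bloop_start (l : String) (ls acc : List String) (cc : Int)
    (h : PySem.Str.strip l ≠ "") : pvBLoop (l :: ls) false acc cc = pvBLoop (l :: ls) true acc cc := by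
  simp [pvBLoop, h]

theorem pv_find_shift (ls : List String) (hne : ∃ l ∈ ls, PySem.Str.strip l ≠ "") :
    ∀ i, pvAFind i ls = pvAFind 0 ls + i := by
  induction ls with
  | nil => simp at hne
  | cons l ls ih =>
    intro i
    by_cases hl : PySem.Str.strip l = ""
    · have hne' : ∃ x ∈ ls, PySem.Str.strip x ≠ "" := by
        rcases hne with ⟨x, hx, hxs⟩
        rcases List.mem_cons.1 hx with rfl | hx'
        · exact absurd hl hxs
        · exact ⟨x, hx', hxs⟩
      simp only [pvAFind, hl, ne_eq, not_true_eq_false, if_false]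
      rw [ih hne' (i+1), ih hne' (0+1)]
      omega
    · simp [pvAFind, hl]

theorem pv_acc_mem (ls : List String) : ∀ (acc : List String) (cc : Int) (x : String),
    x ∈ pvAAcc ls acc cc → x ∈ acc ∨ x ∈ ls := by
  induction ls with
  | nil => intro acc cc x hx; left; simpa [pvAAcc] using hx
  | cons l ls ih =>
    intro acc cc x hx
    simp only [pvAAcc] at hx
    split at hx
    · left; exact hx
    · rcases ih (acc ++ [l]) _ x hx with h | h
      · rcases List.mem_append.1 h with h | h
        · left; exact h
        · right; simp at h; simp [h]
      · right; simp [h]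

theorem pv_bloop_blank (ls : List String) (h : ∀ l ∈ ls, PySem.Str.strip l = "") :
    pvBLoop ls false [] 0 = [] := by
  induction ls with
  | nil => rfl
  | cons l ls ih =>
    rw [pv_bloop_skip l ls [] 0 (h l (by simp))]
    exact ih (fun x hx => h x (by simp [hx]))

-- a line whose strip() is empty consists of whitespace only
theorem pv_strip_nil_all_space (cs : List Char) (h : PySem.Chars.strip cs = []) :
    ∀ c ∈ cs, PySem.Chars.isspace c = true := by
  intro c hc
  have hcs : cs = cs.takeWhile PySem.Chars.isspace ++ cs.dropWhile PySem.Chars.isspace :=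
    (List.takeWhile_append_dropWhile).symm
  rw [hcs] at hc
  rcases List.mem_append.1 hc with h1 | h1
  · exact List.mem_takeWhile_imp h1
  · have hr : PySem.Chars.rstrip (PySem.Chars.lstrip cs) = [] := by
      simpa [PySem.Chars.strip] using h
    have hd : List.dropWhile PySem.Chars.isspace (PySem.Chars.lstrip cs).reverse = [] := by
      have := congrArg List.reverse hr
      simpa [PySem.Chars.rstrip] using this
    have hall := (List.dropWhile_eq_nil_iff).1 hd
    exact hall c (List.mem_reverse.2 (by simpa [PySem.Chars.lstrip] using h1))

theorem pv_rstrip_all_space (cs : List Char) (h : ∀ c ∈ cs, PySem.Chars.isspace c = true) :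
    PySem.Chars.rstrip cs = [] := by
  have : List.dropWhile PySem.Chars.isspace cs.reverse = [] :=
    (List.dropWhile_eq_nil_iff).2 (fun c hc => h c (List.mem_reverse.1 hc))
  simp [PySem.Chars.rstrip, this]

theorem pv_join_all_space (parts : List (List Char)) :
    (∀ p ∈ parts, ∀ c ∈ p, PySem.Chars.isspace c = true) →
    ∀ c ∈ PySem.Chars.join ['\n'] parts, PySem.Chars.isspace c = true := by
  induction parts with
  | nil => intro _ c hc; simp [PySem.Chars.join_nil] at hc
  | cons p ps ih =>
    intro h c hc
    cases ps with
    | nil =>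
      rw [PySem.Chars.join_singleton] at hc
      exact h p (by simp) c hc
    | cons q rest =>
      rw [PySem.Chars.join_cons_cons] at hc
      rcases List.mem_append.1 hc with h1 | h1
      · rcases List.mem_append.1 h1 with h2 | h2
        · exact h p (by simp) c h2
        · simp at h2; subst h2; decide
      · exact ih (fun x hx => h x (by simp [List.mem_cons.1 hx |>.elim (fun e => Or.inl e) Or.inr])) c h1

-- all-whitespace lines join-and-rstrip to the empty string
theorem pv_blank_out (ex : List String) (h : ∀ x ∈ ex, PySem.Str.strip x = "") :
    PySem.Str.rstrip (PySem.Str.join "\n" ex) = "" := by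
  have hparts : ∀ p ∈ ex.map String.toList, ∀ c ∈ p, PySem.Chars.isspace c = true := by
    intro p hp
    rcases List.mem_map.1 hp with ⟨x, hx, rfl⟩
    have : PySem.Chars.strip x.toList = [] := by
      have := congrArg String.toList (h x hx)
      simpa [PySem.Str.toList_strip] using this
    exact pv_strip_nil_all_space _ this
  have hjoin := pv_join_all_space (ex.map String.toList) hparts
  have hnl : ("\n" : String).toList = ['\n'] := by decide
  have : PySem.Chars.rstrip (PySem.Chars.join ['\n'] (ex.map String.toList)) = [] :=
    pv_rstrip_all_space _ hjoin
  simp [PySem.Str.rstrip, PySem.Str.join, hnl, String.toList_ofList, this]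

theorem pv_core (lines : List String) :
    PySem.Str.rstrip (PySem.Str.join "\n"
      (pvAAcc ((lines.drop (pvAFind 0 lines)).take 80) [] 0)) =
    PySem.Str.rstrip (PySem.Str.join "\n" (pvBLoop lines false [] 0)) := by
  induction lines with
  | nil => rfl
  | cons l ls ih =>
    by_cases hl : PySem.Str.strip l = ""
    · by_cases hne : ∃ x ∈ ls, PySem.Str.strip x ≠ ""
      · have hf : pvAFind 0 (l :: ls) = pvAFind 0 ls + 1 := by
          simp only [pvAFind, hl, ne_eq, not_true_eq_false, if_false]
          exact pv_find_shift ls hne 1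
        rw [hf, List.drop_succ_cons, pv_bloop_skip l ls [] 0 hl]
        exact ih
      · have hall : ∀ x ∈ l :: ls, PySem.Str.strip x = "" := by
          intro x hx
          by_contra hc
          rcases List.mem_cons.1 hx with rfl | hx'
          · exact hc hl
          · exact hne ⟨x, hx', hc⟩
        rw [pv_bloop_blank (l :: ls) hall]
        rw [pv_blank_out _ (by
          intro x hx
          rcases pv_acc_mem _ [] 0 x hx with h | h
          · simp at h
          · exact hall x (List.mem_of_mem_drop (List.mem_of_mem_take h)))]
        rfl
    · have hf : pvAFind 0 (l :: ls) = 0 := by simp [pvAFind, hl]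
      rw [hf, List.drop_zero, pv_bloop_start l ls [] 0 hl]
      have hacc := pv_acc_eq (l :: ls) [] 0 (by norm_num)
      simp only [List.length_nil, Nat.sub_zero] at hacc
      rw [hacc]

-- ===== VERDICT (by name: the statement is the Claim_ definition above) =====
theorem build_extract_py_spec : Claim_equal_build_extract_py := by
  intro text _
  unfold Spec_build_extract_py build_extract_py build_extract_py_alt
  rw [PySem.List.slice_toNat _ (by positivity) (by positivity)]
  have h80 : ((pvAFind 0 (PySem.Str.splitlines text) : Int) + 80).toNat -
      ((pvAFind 0 (PySem.Str.splitlines text) : Int)).toNat = 80 := by omega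
  rw [h80]
  have := pv_core (PySem.Str.splitlines text)
  simpa [Int.toNat_natCast, List.take_drop] using this
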